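-- pv_equiv track=rewrite | github.com/prophecy-io/databricks-sql-basics | gems/Regex.py | extract_capturing_groups
-- ===== SOURCE A (Python) =====
-- def extract_capturing_groups(pattern):
--     """Extract individual capturing group patterns from a regex string."""
--     if not pattern:
--         return []
--
--     groups = []
--     i = 0
--
--     while i < len(pattern):
--         if pattern[i] == '(' and (i == 0 or pattern[i-1] != '\\'):
--             # Skip non-capturing groups (?:...) or other special groups (?=...), (?!...), etc.
--             if i + 1 < len(pattern) and pattern[i+1] == '?':
--                 # Find the end of this non-capturing group and skip it
--                 paren_count = 1
--                 j = i + 1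
--                 while j < len(pattern) and paren_count > 0:
--                     if pattern[j] == '\\' and j + 1 < len(pattern):
--                         j += 2
--                         continue
--                     elif pattern[j] == '(':
--                         paren_count += 1
--                     elif pattern[j] == ')':
--                         paren_count -= 1
--                     j += 1
--                 i = j
--                 continue
--
--             # This is a capturing group - find its end
--             start = i
--             paren_count = 1
--             j = i + 1
--
--             while j < len(pattern) and paren_count > 0:
--                 if pattern[j] == '\\' and j + 1 < len(pattern):
--                     j += 2
--                     continue
--                 elif pattern[j] == '(':
--                     paren_count += 1
--                 elif pattern[j] == ')':
--                     paren_count -= 1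
--                 j += 1
--
--             if paren_count == 0:
--                 group = pattern[start:j]
--                 groups.append(group)
--             i = j
--         else:
--             i += 1
--
--     return groups
-- ===== SOURCE B (Python) =====
-- def extract_capturing_groups(pattern):
--     """Single flat pass with a depth counter and an optional recorded start index."""
--     groups = []
--     n = len(pattern)
--     i = 0
--     depth = 0
--     start = None
--     while i < n:
--         if depth == 0:
--             if pattern[i] == '(' and (i == 0 or pattern[i-1] != '\\'):
--                 depth = 1
--                 start = None if (i + 1 < n and pattern[i+1] == '?') else i
--             i += 1
--         else:
--             c = pattern[i]
--             if c == '\\' and i + 1 < n: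
--                 i += 2
--                 continue
--             elif c == '(':
--                 depth += 1
--             elif c == ')':
--                 depth -= 1
--                 if depth == 0:
--                     if start is not None:
--                         groups.append(pattern[start:i+1])
--                     start = None
--             i += 1
--     return groups
-- ===== Notes on version B (the rewrite author's own statement) =====
-- stated objective: simpler
-- what changed: Replaced A's outer loop with two nested matching-paren scan loops by one flat single pass maintaining an integer depth counter and an optional recorded group-start index.
import Mathlib
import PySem

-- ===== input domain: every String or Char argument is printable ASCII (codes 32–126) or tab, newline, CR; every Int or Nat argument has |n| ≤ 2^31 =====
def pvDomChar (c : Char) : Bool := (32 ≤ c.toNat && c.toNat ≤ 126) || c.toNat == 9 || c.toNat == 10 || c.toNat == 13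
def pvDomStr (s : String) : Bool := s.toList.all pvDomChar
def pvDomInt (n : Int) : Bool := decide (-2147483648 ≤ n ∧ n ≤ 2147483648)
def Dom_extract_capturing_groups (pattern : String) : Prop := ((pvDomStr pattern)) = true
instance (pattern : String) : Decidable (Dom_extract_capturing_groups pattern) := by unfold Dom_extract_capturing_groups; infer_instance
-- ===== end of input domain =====

-- B replaces A's outer loop + two nested matching-paren scans by one flat pass with a depth
-- counter and an optional recorded start index (objective: simpler; same behaviour, same cost).
-- While loops are ported with a structural fuel parameter; a fuel of n (the string length)
-- always suffices since the position strictly increases each iteration.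

-- ===== PORT A =====
-- A's inner while loop (shared verbatim by both of A's inner scans): from position j with
-- paren_count pc, returns the final (j, paren_count).  pattern[j] with j < n is in range,
-- ported as getD; pattern[start:j] with 0 ≤ start ≤ j ≤ n is exactly (drop start).take (j-start).
def pvScanA (xs : List Char) (n : Nat) : Nat → Nat → Nat → Nat × Nat
  | 0, j, pc => (j, pc)
  | fuel + 1, j, pc =>
    if j < n ∧ 0 < pc then
      if xs.getD j ' ' = '\\' ∧ j + 1 < n then pvScanA xs n fuel (j + 2) pc
      else if xs.getD j ' ' = '(' then pvScanA xs n fuel (j + 1) (pc + 1)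
      else if xs.getD j ' ' = ')' then pvScanA xs n fuel (j + 1) (pc - 1)
      else pvScanA xs n fuel (j + 1) pc
    else (j, pc)

-- A's outer while loop
def pvLoopA (xs : List Char) (n : Nat) : Nat → Nat → List String → List String
  | 0, _, groups => groups
  | fuel + 1, i, groups =>
    if i < n then
      if xs.getD i ' ' = '(' ∧ (i = 0 ∨ xs.getD (i - 1) ' ' ≠ '\\') then
        if i + 1 < n ∧ xs.getD (i + 1) ' ' = '?' then
          pvLoopA xs n fuel (pvScanA xs n n (i + 1) 1).1 groups
        else
          let r := pvScanA xs n n (i + 1) 1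
          if r.2 = 0 then
            pvLoopA xs n fuel r.1 (groups ++ [String.ofList ((xs.drop i).take (r.1 - i))])
          else pvLoopA xs n fuel r.1 groups
      else pvLoopA xs n fuel (i + 1) groups
    else groups

def extract_capturing_groups (pattern : String) : List String :=
  if pattern = "" then []
  else pvLoopA pattern.toList pattern.toList.length pattern.toList.length 0 []

-- ===== PORT B =====
-- B's single while loop: state (i, depth, start, groups)
def pvLoopB (xs : List Char) (n : Nat) : Nat → Nat → Nat → Option Nat → List String → List String
  | 0, _, _, _, groups => groups
  | fuel + 1, i, depth, start, groups =>
    if i < n then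
      if depth = 0 then
        if xs.getD i ' ' = '(' ∧ (i = 0 ∨ xs.getD (i - 1) ' ' ≠ '\\') then
          if i + 1 < n ∧ xs.getD (i + 1) ' ' = '?' then
            pvLoopB xs n fuel (i + 1) 1 none groups
          else pvLoopB xs n fuel (i + 1) 1 (some i) groups
        else pvLoopB xs n fuel (i + 1) 0 start groups
      else
        if xs.getD i ' ' = '\\' ∧ i + 1 < n then pvLoopB xs n fuel (i + 2) depth start groups
        else if xs.getD i ' ' = '(' then pvLoopB xs n fuel (i + 1) (depth + 1) start groups
        else if xs.getD i ' ' = ')' then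
          if depth - 1 = 0 then
            match start with
            | some s =>
                pvLoopB xs n fuel (i + 1) 0 none
                  (groups ++ [String.ofList ((xs.drop s).take (i + 1 - s))])
            | none => pvLoopB xs n fuel (i + 1) 0 none groups
          else pvLoopB xs n fuel (i + 1) (depth - 1) start groups
        else pvLoopB xs n fuel (i + 1) depth start groups
    else groups

def extract_capturing_groups_alt (pattern : String) : List String :=
  pvLoopB pattern.toList pattern.toList.length pattern.toList.length 0 0 none []

-- ===== PRECONDITION & SPEC =====
def Spec_extract_capturing_groups (pattern : String) (out : List String) : Prop := out = extract_capturing_groups_alt pattern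
instance (pattern : String) (out : List String) : Decidable (Spec_extract_capturing_groups pattern out) := by unfold Spec_extract_capturing_groups; infer_instance

-- ===== CLAIM (what is proved, stated in full; the proofs are below) =====
def Claim_equal_extract_capturing_groups : Prop := ∀ (pattern : String), Dom_extract_capturing_groups pattern → Spec_extract_capturing_groups pattern (extract_capturing_groups pattern)

-- ===== LEMMAS AND PROOFS =====

-- definitional unfolding lemmas (rfl), for controlled rewriting
theorem pvScanA_succ (xs : List Char) (n fuel j pc : Nat) :
    pvScanA xs n (fuel + 1) j pc =
      (if j < n ∧ 0 < pc then
        if xs.getD j ' ' = '\\' ∧ j + 1 < n then pvScanA xs n fuel (j + 2) pc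
        else if xs.getD j ' ' = '(' then pvScanA xs n fuel (j + 1) (pc + 1)
        else if xs.getD j ' ' = ')' then pvScanA xs n fuel (j + 1) (pc - 1)
        else pvScanA xs n fuel (j + 1) pc
      else (j, pc)) := rfl

theorem pvLoopA_succ (xs : List Char) (n fuel i : Nat) (groups : List String) :
    pvLoopA xs n (fuel + 1) i groups =
      (if i < n then
        if xs.getD i ' ' = '(' ∧ (i = 0 ∨ xs.getD (i - 1) ' ' ≠ '\\') then
          if i + 1 < n ∧ xs.getD (i + 1) ' ' = '?' then
            pvLoopA xs n fuel (pvScanA xs n n (i + 1) 1).1 groups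
          else
            let r := pvScanA xs n n (i + 1) 1
            if r.2 = 0 then
              pvLoopA xs n fuel r.1 (groups ++ [String.ofList ((xs.drop i).take (r.1 - i))])
            else pvLoopA xs n fuel r.1 groups
        else pvLoopA xs n fuel (i + 1) groups
      else groups) := rfl

theorem pvLoopB_succ (xs : List Char) (n fuel i depth : Nat) (start : Option Nat)
    (groups : List String) :
    pvLoopB xs n (fuel + 1) i depth start groups =
      (if i < n then
        if depth = 0 then
          if xs.getD i ' ' = '(' ∧ (i = 0 ∨ xs.getD (i - 1) ' ' ≠ '\\') then
            if i + 1 < n ∧ xs.getD (i + 1) ' ' = '?' then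
              pvLoopB xs n fuel (i + 1) 1 none groups
            else pvLoopB xs n fuel (i + 1) 1 (some i) groups
          else pvLoopB xs n fuel (i + 1) 0 start groups
        else
          if xs.getD i ' ' = '\\' ∧ i + 1 < n then pvLoopB xs n fuel (i + 2) depth start groups
          else if xs.getD i ' ' = '(' then pvLoopB xs n fuel (i + 1) (depth + 1) start groups
          else if xs.getD i ' ' = ')' then
            if depth - 1 = 0 then
              match start with
              | some s =>
                  pvLoopB xs n fuel (i + 1) 0 none
                    (groups ++ [String.ofList ((xs.drop s).take (i + 1 - s))])
              | none => pvLoopB xs n fuel (i + 1) 0 none groups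
            else pvLoopB xs n fuel (i + 1) (depth - 1) start groups
          else pvLoopB xs n fuel (i + 1) depth start groups
      else groups) := rfl

-- the scan never moves left
theorem pvScanA_ge (xs : List Char) (n : Nat) :
    ∀ fuel j pc, j ≤ (pvScanA xs n fuel j pc).1 := by
  intro fuel
  induction fuel with
  | zero => intro j pc; simp [pvScanA]
  | succ fuel ih =>
    intro j pc
    rw [pvScanA]
    by_cases h : j < n ∧ 0 < pc
    · simp only [if_pos h]
      split_ifs with h1 h2 h3
      · exact le_trans (by omega) (ih (j + 2) pc)
      · exact le_trans (by omega) (ih (j + 1) (pc + 1))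
      · exact le_trans (by omega) (ih (j + 1) (pc - 1))
      · exact le_trans (by omega) (ih (j + 1) pc)
    · simp [if_neg h]

-- with enough fuel the scan only stops at the end of the string or at paren_count 0
theorem pvScanA_exit (xs : List Char) (n : Nat) :
    ∀ fuel j pc, n ≤ j + fuel →
      ¬ ((pvScanA xs n fuel j pc).1 < n ∧ 0 < (pvScanA xs n fuel j pc).2) := by
  intro fuel
  induction fuel with
  | zero => intro j pc hf; simp [pvScanA]; omega
  | succ fuel ih =>
    intro j pc hf
    rw [pvScanA]
    by_cases h : j < n ∧ 0 < pc
    · simp only [if_pos h]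
      split_ifs with h1 h2 h3
      · exact ih (j + 2) pc (by omega)
      · exact ih (j + 1) (pc + 1) (by omega)
      · exact ih (j + 1) (pc - 1) (by omega)
      · exact ih (j + 1) pc (by omega)
    · simp only [if_neg h]; exact h

-- fuel irrelevance for the scan
theorem pvScanA_stable (xs : List Char) (n : Nat) :
    ∀ fuel j pc, n ≤ j + fuel →
      pvScanA xs n (fuel + 1) j pc = pvScanA xs n fuel j pc := by
  intro fuel
  induction fuel with
  | zero =>
    intro j pc hf
    rw [pvScanA, pvScanA]
    simp only [if_neg (by omega : ¬ (j < n ∧ 0 < pc))]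
  | succ fuel ih =>
    intro j pc hf
    rw [pvScanA_succ xs n (fuel + 1) j pc, pvScanA_succ xs n fuel j pc]
    by_cases h : j < n ∧ 0 < pc
    · simp only [if_pos h]
      split_ifs with h1 h2 h3
      · exact ih (j + 2) pc (by omega)
      · exact ih (j + 1) (pc + 1) (by omega)
      · exact ih (j + 1) (pc - 1) (by omega)
      · exact ih (j + 1) pc (by omega)
    · simp only [if_neg h]

theorem pvScanA_add (xs : List Char) (n : Nat) :
    ∀ k fuel j pc, n ≤ j + fuel →
      pvScanA xs n (fuel + k) j pc = pvScanA xs n fuel j pc := by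
  intro k
  induction k with
  | zero => intro fuel j pc _; rfl
  | succ k ih =>
    intro fuel j pc hf
    have : fuel + (k + 1) = (fuel + k) + 1 := by omega
    rw [this, pvScanA_stable xs n (fuel + k) j pc (by omega), ih fuel j pc hf]

theorem pvScanA_irrel (xs : List Char) (n : Nat) (f g j pc : Nat)
    (hf : n ≤ j + f) (hg : n ≤ j + g) :
    pvScanA xs n f j pc = pvScanA xs n g j pc := by
  rcases le_total f g with h | h
  · have : g = f + (g - f) := by omega
    rw [this, pvScanA_add xs n (g - f) f j pc hf]
  · have : f = g + (f - g) := by omega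
    rw [this, pvScanA_add xs n (f - g) g j pc hg]

-- a scan at paren_count 0 stops immediately
theorem pvScanA_pc0 (xs : List Char) (n : Nat) (fuel j : Nat) :
    pvScanA xs n fuel j 0 = (j, 0) := by
  cases fuel with
  | zero => rfl
  | succ fuel => rw [pvScanA]; simp

-- fuel irrelevance for B's loop
theorem pvLoopB_stable (xs : List Char) (n : Nat) :
    ∀ fuel i depth start groups, n ≤ i + fuel →
      pvLoopB xs n (fuel + 1) i depth start groups = pvLoopB xs n fuel i depth start groups := by
  intro fuel
  induction fuel with
  | zero =>
    intro i depth start groups hf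
    rw [pvLoopB_succ]
    simp only [if_neg (by omega : ¬ i < n)]
    rfl
  | succ fuel ih =>
    intro i depth start groups hf
    rw [pvLoopB_succ xs n (fuel + 1) i depth start groups, pvLoopB_succ xs n fuel i depth start groups]
    by_cases h : i < n
    · simp only [if_pos h]
      by_cases hd : depth = 0
      · simp only [if_pos hd]
        split_ifs with h1 h2
        · exact ih (i + 1) 1 none groups (by omega)
        · exact ih (i + 1) 1 (some i) groups (by omega)
        · exact ih (i + 1) 0 start groups (by omega)
      · simp only [if_neg hd]
        split_ifs with h1 h2 h3 h4
        · exact ih (i + 2) depth start groups (by omega)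
        · exact ih (i + 1) (depth + 1) start groups (by omega)
        · cases start with
          | some s => exact ih (i + 1) 0 none _ (by omega)
          | none => exact ih (i + 1) 0 none groups (by omega)
        · exact ih (i + 1) (depth - 1) start groups (by omega)
        · exact ih (i + 1) depth start groups (by omega)
    · simp only [if_neg h]

theorem pvLoopB_add (xs : List Char) (n : Nat) :
    ∀ k fuel i depth start groups, n ≤ i + fuel →
      pvLoopB xs n (fuel + k) i depth start groups = pvLoopB xs n fuel i depth start groups := by
  intro k
  induction k with
  | zero => intro fuel i depth start groups _; rfl
  | succ k ih =>
    intro fuel i depth start groups hf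
    have : fuel + (k + 1) = (fuel + k) + 1 := by omega
    rw [this, pvLoopB_stable xs n (fuel + k) i depth start groups (by omega),
      ih fuel i depth start groups hf]

theorem pvLoopB_irrel (xs : List Char) (n : Nat) (f g i depth : Nat) (start : Option Nat)
    (groups : List String) (hf : n ≤ i + f) (hg : n ≤ i + g) :
    pvLoopB xs n f i depth start groups = pvLoopB xs n g i depth start groups := by
  rcases le_total f g with h | h
  · have : g = f + (g - f) := by omega
    rw [this, pvLoopB_add xs n (g - f) f i depth start groups hf]
  · have : f = g + (f - g) := by omega
    rw [this, pvLoopB_add xs n (f - g) g i depth start groups hg]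

-- B's loop inside a group (depth > 0) behaves exactly as A's matching-paren scan dictates.
theorem pvLoopB_scan (xs : List Char) (n : Nat) :
    ∀ fuel j pc (start : Option Nat) (groups : List String), 0 < pc → n ≤ j + fuel →
      pvLoopB xs n fuel j pc start groups =
        (let r := pvScanA xs n n j pc
         if r.2 = 0 then
           pvLoopB xs n fuel r.1 0 none
             (match start with
              | some s => groups ++ [String.ofList ((xs.drop s).take (r.1 - s))]
              | none => groups)
         else groups) := by
  intro fuel
  induction fuel with
  | zero =>
    intro j pc start groups hpc hf
    rw [pvScanA_irrel xs n n 0 j pc (by omega) (by omega), pvScanA]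
    simp only [if_neg (by omega : ¬ pc = 0)]
    rfl
  | succ fuel ih =>
    intro j pc start groups hpc hf
    by_cases h : j < n
    · -- unfold the canonical scan (fuel n) one step via fuel irrelevance
      rw [pvScanA_irrel xs n n (fuel + 1) j pc (by omega) (by omega)]
      rw [pvLoopB_succ, pvScanA_succ]
      simp only [if_pos h, if_pos (show j < n ∧ 0 < pc from ⟨h, hpc⟩),
        if_neg (by omega : ¬ pc = 0)]
      by_cases h1 : xs.getD j ' ' = '\\' ∧ j + 1 < n
      · -- escape: both advance two
        simp only [if_pos h1]
        rw [pvScanA_irrel xs n fuel n (j + 2) pc (by omega) (by omega)]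
        rw [ih (j + 2) pc start groups hpc (by omega)]
        simp only []
        by_cases hc : (pvScanA xs n n (j + 2) pc).2 = 0
        · simp only [if_pos hc]
          have hge := pvScanA_ge xs n n (j + 2) pc
          exact pvLoopB_irrel xs n fuel (fuel + 1) _ 0 none _ (by omega) (by omega)
        · simp only [if_neg hc]
      · simp only [if_neg h1]
        by_cases h2 : xs.getD j ' ' = '('
        · -- '(' : depth up
          simp only [if_pos h2]
          rw [pvScanA_irrel xs n fuel n (j + 1) (pc + 1) (by omega) (by omega)]
          rw [ih (j + 1) (pc + 1) start groups (by omega) (by omega)]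
          simp only []
          by_cases hc : (pvScanA xs n n (j + 1) (pc + 1)).2 = 0
          · simp only [if_pos hc]
            have hge := pvScanA_ge xs n n (j + 1) (pc + 1)
            exact pvLoopB_irrel xs n fuel (fuel + 1) _ 0 none _ (by omega) (by omega)
          · simp only [if_neg hc]
        · simp only [if_neg h2]
          by_cases h3 : xs.getD j ' ' = ')'
          · -- ')' : depth down, possibly closing the group
            simp only [if_pos h3]
            by_cases hpc1 : pc - 1 = 0
            · simp only [if_pos hpc1]
              rw [show pvScanA xs n fuel (j + 1) (pc - 1) = (j + 1, 0) by
                rw [hpc1]; exact pvScanA_pc0 xs n fuel (j + 1)]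
              cases start with
              | some s =>
                exact pvLoopB_irrel xs n fuel (fuel + 1) (j + 1) 0 none _ (by omega) (by omega)
              | none =>
                exact pvLoopB_irrel xs n fuel (fuel + 1) (j + 1) 0 none groups (by omega) (by omega)
            · simp only [if_neg hpc1]
              rw [pvScanA_irrel xs n fuel n (j + 1) (pc - 1) (by omega) (by omega)]
              rw [ih (j + 1) (pc - 1) start groups (by omega) (by omega)]
              simp only []
              by_cases hc : (pvScanA xs n n (j + 1) (pc - 1)).2 = 0
              · simp only [if_pos hc]
                have hge := pvScanA_ge xs n n (j + 1) (pc - 1)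
                exact pvLoopB_irrel xs n fuel (fuel + 1) _ 0 none _ (by omega) (by omega)
              · simp only [if_neg hc]
          · -- ordinary character
            simp only [if_neg h3]
            rw [pvScanA_irrel xs n fuel n (j + 1) pc (by omega) (by omega)]
            rw [ih (j + 1) pc start groups hpc (by omega)]
            simp only []
            by_cases hc : (pvScanA xs n n (j + 1) pc).2 = 0
            · simp only [if_pos hc]
              have hge := pvScanA_ge xs n n (j + 1) pc
              exact pvLoopB_irrel xs n fuel (fuel + 1) _ 0 none _ (by omega) (by omega)
            · simp only [if_neg hc]
    · -- past the end: the scan exits with pc > 0 and the loop exits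
      rw [pvLoopB_succ]
      rw [pvScanA_irrel xs n n 0 j pc (by omega) (by omega), pvScanA]
      simp only [if_neg h, if_neg (by omega : ¬ pc = 0)]

-- the main invariant: A's outer loop = B's loop at depth 0 with no recorded start
theorem pvLoopA_eq_loopB (xs : List Char) (n : Nat) :
    ∀ fuelA fuelB i groups, n ≤ i + fuelA → n ≤ i + fuelB →
      pvLoopA xs n fuelA i groups = pvLoopB xs n fuelB i 0 none groups := by
  intro fuelA
  induction fuelA with
  | zero =>
    intro fuelB i groups hA hB
    rw [pvLoopA]
    cases fuelB with
    | zero => rfl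
    | succ fuelB => rw [pvLoopB_succ]; simp only [if_neg (by omega : ¬ i < n)]
  | succ fuelA ih =>
    intro fuelB i groups hA hB
    by_cases h : i < n
    · obtain ⟨fb, rfl⟩ : ∃ fb, fuelB = fb + 1 := ⟨fuelB - 1, by omega⟩
      rw [pvLoopA_succ, pvLoopB_succ]
      simp only [if_pos h, reduceIte]
      by_cases h1 : xs.getD i ' ' = '(' ∧ (i = 0 ∨ xs.getD (i - 1) ' ' ≠ '\\')
      · simp only [if_pos h1]
        have hge := pvScanA_ge xs n n (i + 1) 1
        have hexit := pvScanA_exit xs n n (i + 1) 1 (by omega)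
        by_cases h2 : i + 1 < n ∧ xs.getD (i + 1) ' ' = '?'
        · simp only [if_pos h2]
          rw [pvLoopB_scan xs n fb (i + 1) 1 none groups (by omega) (by omega)]
          simp only []
          by_cases hc : (pvScanA xs n n (i + 1) 1).2 = 0
          · simp only [if_pos hc]
            exact ih fb _ groups (by omega) (by omega)
          · simp only [if_neg hc]
            have : ¬ (pvScanA xs n n (i + 1) 1).1 < n := by omega
            cases fuelA with
            | zero => rfl
            | succ fuelA => rw [pvLoopA_succ]; simp only [if_neg this]
        · simp only [if_neg h2]
          rw [pvLoopB_scan xs n fb (i + 1) 1 (some i) groups (by omega) (by omega)]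
          simp only []
          by_cases hc : (pvScanA xs n n (i + 1) 1).2 = 0
          · simp only [if_pos hc]
            exact ih fb _ _ (by omega) (by omega)
          · simp only [if_neg hc]
            have : ¬ (pvScanA xs n n (i + 1) 1).1 < n := by omega
            cases fuelA with
            | zero => rfl
            | succ fuelA => rw [pvLoopA_succ]; simp only [if_neg this]
      · simp only [if_neg h1]
        exact ih fb (i + 1) groups (by omega) (by omega)
    · cases fuelB with
      | zero => rw [pvLoopA_succ]; simp only [if_neg h]; rfl
      | succ fuelB => rw [pvLoopA_succ, pvLoopB_succ]; simp only [if_neg h]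

-- ===== VERDICT (by name: the statement is the Claim_ definition above) =====
theorem extract_capturing_groups_spec : Claim_equal_extract_capturing_groups := by
  intro pattern _
  unfold Spec_extract_capturing_groups extract_capturing_groups extract_capturing_groups_alt
  by_cases he : pattern = ""
  · subst he
    rfl
  · simp only [if_neg he]
    exact pvLoopA_eq_loopB _ _ _ _ 0 [] (by omega) (by omega)
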